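-- pv_equiv track=rewrite | github.com/limkeunhyeok/daily-coding | 매일 프로그래밍/20210125/solution.py | solution
-- ===== SOURCE A (Python) =====
-- def solution(arr):
--     answer = []
--     length = len(arr)
--
--     for i in range(length):
--         temp = i
--         for j in range(length - i):
--             if sum(arr[j:temp + j + 1]) == 0:
--                 answer.append(arr[j:temp + j + 1])
--     return answer
-- ===== SOURCE B (Python) =====
-- def solution(arr):
--     n = len(arr)
--     prefix = [0]
--     for x in arr:
--         prefix.append(prefix[-1] + x)
--     answer = []
--     for L in range(1, n + 1):
--         for j in range(n - L + 1):
--             if prefix[j + L] == prefix[j]: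
--                 answer.append(arr[j:j + L])
--     return answer
-- ===== Notes on version B (the rewrite author's own statement) =====
-- stated objective: faster
-- what changed: B precomputes a prefix-sum table once and tests each subarray's zero-sum condition by comparing two prefix values in O(1), instead of A's re-summing every slice with sum().
import Mathlib
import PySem

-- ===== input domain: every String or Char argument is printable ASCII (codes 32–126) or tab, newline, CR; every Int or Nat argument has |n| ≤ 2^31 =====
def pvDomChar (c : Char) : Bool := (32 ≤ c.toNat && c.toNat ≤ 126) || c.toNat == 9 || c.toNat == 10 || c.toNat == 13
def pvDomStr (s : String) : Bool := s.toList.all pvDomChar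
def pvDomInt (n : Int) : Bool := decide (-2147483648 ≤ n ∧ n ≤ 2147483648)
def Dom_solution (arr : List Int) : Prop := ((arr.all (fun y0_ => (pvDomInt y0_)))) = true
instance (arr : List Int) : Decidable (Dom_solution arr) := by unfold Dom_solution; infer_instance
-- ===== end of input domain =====

-- B replaces A's per-subarray re-summation (O(n^3)) by a prefix-sum table tested in O(1) per subarray.


-- ===== PORT A =====
def solution (arr : List Int) : List (List Int) :=
  let length : Int := arr.length
  (PySem.List.pyRange 0 length 1).foldl (fun answer i =>
    -- temp = i
    (PySem.List.pyRange 0 (length - i) 1).foldl (fun answer j =>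
      if (PySem.List.slice arr (some j) (some (i + j + 1))).sum = 0 then
        answer ++ [PySem.List.slice arr (some j) (some (i + j + 1))]
      else answer) answer) []

-- ===== PORT B =====
def solution_alt (arr : List Int) : List (List Int) :=
  let n : Int := arr.length
  -- prefix = [0]; for x in arr: prefix.append(prefix[-1] + x)
  let pref := arr.foldl (fun p x => p ++ [PySem.List.pyGetD p (-1) 0 + x]) [0]
  (PySem.List.pyRange 1 (n + 1) 1).foldl (fun answer L =>
    (PySem.List.pyRange 0 (n - L + 1) 1).foldl (fun answer j =>
      if PySem.List.pyGetD pref (j + L) 0 = PySem.List.pyGetD pref j 0 then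
        answer ++ [PySem.List.slice arr (some j) (some (j + L))]
      else answer) answer) []

-- ===== PRECONDITION & SPEC =====
def Spec_solution (arr : List Int) (out : List (List Int)) : Prop := out = solution_alt arr
instance (arr : List Int) (out : List (List Int)) : Decidable (Spec_solution arr out) := by unfold Spec_solution; infer_instance

-- ===== CLAIM (what is proved, stated in full; the proofs are below) =====
def Claim_equal_solution : Prop := ∀ (arr : List Int), Dom_solution arr → Spec_solution arr (solution arr)

-- ===== LEMMAS AND PROOFS =====

-- B's appending loop builds List.scanl (·+·)
theorem prefix_foldl_scanl (arr : List Int) : ∀ (p : List Int) (s : Int),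
    arr.foldl (fun p x => p ++ [PySem.List.pyGetD p (-1) 0 + x]) (p ++ [s])
      = p ++ List.scanl (· + ·) s arr := by
  induction arr with
  | nil => intro p s; simp
  | cons x xs ih =>
    intro p s
    have hlast : PySem.List.pyGetD (p ++ [s]) (-1) 0 = s := by simp [pysem]
    simp only [List.foldl_cons, hlast, List.scanl]
    have := ih (p ++ [s]) (s + x)
    simpa using this

theorem scanl_getD (arr : List Int) : ∀ (s : Int) (k : Nat), k ≤ arr.length →
    (List.scanl (· + ·) s arr).getD k 0 = s + (arr.take k).sum := by
  induction arr with
  | nil =>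
    intro s k hk
    have : k = 0 := by simpa using hk
    subst this; simp
  | cons x xs ih =>
    intro s k hk
    cases k with
    | zero => simp
    | succ k =>
      rw [List.scanl_cons]
      simp only [List.getD, List.getElem?_cons_succ, List.take_succ_cons, List.sum_cons]
      have := ih (s + x) k (by simpa using hk)
      simp only [List.getD] at this
      rw [this]; ring

theorem prefix_getD (arr : List Int) (k : Nat) (hk : k ≤ arr.length) :
    (arr.foldl (fun p x => p ++ [PySem.List.pyGetD p (-1) 0 + x]) [0]).getD k 0
      = (arr.take k).sum := by
  have h := prefix_foldl_scanl arr [] 0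
  simp only [List.nil_append] at h
  rw [h, scanl_getD arr 0 k hk, zero_add]

theorem slice_sum (arr : List Int) (j L : Int) (hj : 0 ≤ j) (hL : 0 ≤ L) :
    (PySem.List.slice arr (some j) (some (j + L))).sum
      = (arr.take (j + L).toNat).sum - (arr.take j.toNat).sum := by
  rw [PySem.List.slice_toNat arr hj (by omega)]
  have hjl : (j + L).toNat = j.toNat + ((j + L).toNat - j.toNat) := by omega
  rw [hjl, List.take_add, List.sum_append, Nat.add_sub_cancel_left]
  ring

theorem solution_eq (arr : List Int) : solution arr = solution_alt arr := by
  unfold solution solution_alt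
  simp only [PySem.List.pyRange_one, List.foldl_map]
  have hrange : ((arr.length : Int) + 1 - 1).toNat = ((arr.length : Int) - 0).toNat := by omega
  rw [hrange]
  apply PySem.List.foldl_congr_mem
  intro acc k hk
  have hkn : k < arr.length := by
    simpa using (List.mem_range.mp hk)
  have hbound : ((arr.length : Int) - (0 + ↑k)) = ((arr.length : Int) - (1 + ↑k) + 1) := by ring
  rw [hbound]
  apply PySem.List.foldl_congr_mem
  intro acc2 m hm
  have hmn : (m : Int) ≤ (arr.length : Int) - (1 + (k : Int)) := by
    simpa using (List.mem_range.mp hm)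
  -- both use start index j = 0 + m, A's stop = (0+k) + (0+m) + 1, B's stop = (0+m) + (1+k)
  have hstop : ((0:Int) + ↑k) + ((0:Int) + ↑m) + 1 = ((0:Int) + ↑m) + ((1:Int) + ↑k) := by ring
  rw [hstop]
  -- turn the conditions into each other
  set j : Int := (0:Int) + ↑m with hjdef
  set L : Int := (1:Int) + ↑k with hLdef
  have hj : 0 ≤ j := by positivity
  have hL : 0 ≤ L := by positivity
  have hb : (j + L).toNat ≤ arr.length := by
    simp only [hjdef, hLdef]; omega
  have hsum := slice_sum arr j L hj hL
  have hjle : j.toNat ≤ arr.length := by simp only [hjdef]; omega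
  have hgd1 : PySem.List.pyGetD
      (arr.foldl (fun p x => p ++ [PySem.List.pyGetD p (-1) 0 + x]) [0]) (j + L) 0
      = (arr.take (j + L).toNat).sum := by
    rw [PySem.List.pyGetD_of_nonneg _ _ (by omega), prefix_getD arr _ hb]
  have hgd2 : PySem.List.pyGetD
      (arr.foldl (fun p x => p ++ [PySem.List.pyGetD p (-1) 0 + x]) [0]) j 0
      = (arr.take j.toNat).sum := by
    rw [PySem.List.pyGetD_of_nonneg _ _ hj, prefix_getD arr _ hjle]
  rw [hgd1, hgd2, hsum]
  by_cases hc : (arr.take (j + L).toNat).sum - (arr.take j.toNat).sum = 0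
  · rw [if_pos hc, if_pos (by omega)]
  · rw [if_neg hc, if_neg (by omega)]

-- ===== VERDICT (by name: the statement is the Claim_ definition above) =====
theorem solution_spec : Claim_equal_solution := by
  intro arr _
  unfold Spec_solution
  exact solution_eq arr
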